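-- pv_equiv track=rewrite | github.com/JuanBlanco9/German-Budget-Galaxy | scripts/enrich_uk_suppliers_ubo.py | summarize_resolution
-- ===== SOURCE A (Python) =====
-- def summarize_resolution(chains: list[list[dict]]) -> str:
--     """One-word overall resolution for the whole company."""
--     if not chains:
--         return "no_psc"
--     resolutions = {c[-1].get("resolution") for c in chains}
--     if resolutions == {"individual"}:
--         return "individual"
--     if resolutions == {"government"}:
--         return "government"
--     if resolutions <= {"individual", "government"}:
--         return "mixed_clear"
--     if "foreign_unresolved" in resolutions:
--         return "partial_foreign" if (resolutions & {"individual", "government"}) else "foreign_unresolved"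
--     if "unresolved_statement" in resolutions or "no_psc_data" in resolutions:
--         return "partial_unresolved"
--     return "partial_unresolved"
-- ===== SOURCE B (Python) =====
-- _CAT = {"individual": 1, "government": 2, "foreign_unresolved": 4}
--
-- _TABLE = {
--     1: "individual",
--     2: "government",
--     3: "mixed_clear",
--     4: "foreign_unresolved",
--     5: "partial_foreign",
--     6: "partial_foreign",
--     7: "partial_foreign",
--     8: "partial_unresolved",
--     9: "partial_unresolved",
--     10: "partial_unresolved",
--     11: "partial_unresolved",
--     12: "foreign_unresolved",
--     13: "partial_foreign",
--     14: "partial_foreign",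
--     15: "partial_foreign",
-- }
--
--
-- def summarize_resolution(chains: list[list[dict]]) -> str:
--     """One-word overall resolution for the whole company."""
--     if not chains:
--         return "no_psc"
--     mask = 0
--     for c in chains:
--         mask |= _CAT.get(c[-1].get("resolution"), 8)
--     return _TABLE[mask]
-- ===== Notes on version B (the rewrite author's own statement) =====
-- stated objective: alternative
-- what changed: Replaces A's set of resolution strings and its set-equality/subset/intersection decision ladder with a bitmask: each chain is mapped to a category bit (individual=1, government=2, foreign=4, other=8) folded with bitwise OR, and the answer is read from a precomputed 15-entry lookup table with no branching.
import Mathlib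
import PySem

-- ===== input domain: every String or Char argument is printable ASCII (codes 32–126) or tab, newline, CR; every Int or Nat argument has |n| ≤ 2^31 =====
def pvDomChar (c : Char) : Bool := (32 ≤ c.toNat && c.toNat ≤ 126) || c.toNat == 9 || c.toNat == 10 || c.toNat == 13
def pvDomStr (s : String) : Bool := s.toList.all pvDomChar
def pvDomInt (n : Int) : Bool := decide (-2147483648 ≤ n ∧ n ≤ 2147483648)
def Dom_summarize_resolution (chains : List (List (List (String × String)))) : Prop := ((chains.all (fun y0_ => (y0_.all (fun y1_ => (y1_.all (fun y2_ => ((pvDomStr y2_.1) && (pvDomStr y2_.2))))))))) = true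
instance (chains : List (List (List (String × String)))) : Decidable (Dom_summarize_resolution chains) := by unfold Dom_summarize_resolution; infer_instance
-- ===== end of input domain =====

-- B replaces A's set of resolution strings and its set-algebra decision ladder by a bitmask
-- (individual=1, government=2, foreign=4, other=8) folded with bitwise OR and a precomputed
-- 15-entry lookup table; objective: alternative.

-- ===== PORT A =====
-- c[-1].get("resolution"): none both for IndexError (excluded by Pre_) and a missing key
def pvResA (c : List (List (String × String))) : Option String :=
  match PySem.List.pyGet? c (-1) with
  | some d => (PySem.Dict.mk d).get? "resolution"
  | none => none

def summarize_resolution (chains : List (List (List (String × String)))) : String :=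
  if chains = [] then "no_psc"
  else
    let resolutions : PySem.Set (Option String) := PySem.Set.ofList (chains.map pvResA)
    if PySem.Set.equal resolutions (PySem.Set.ofList [some "individual"]) then "individual"
    else if PySem.Set.equal resolutions (PySem.Set.ofList [some "government"]) then "government"
    else if PySem.Set.issubset resolutions (PySem.Set.ofList [some "individual", some "government"]) then "mixed_clear"
    else if PySem.Set.contains resolutions (some "foreign_unresolved") then
      -- Python truthiness of the intersection set = non-emptiness
      if !(PySem.Set.inter resolutions (PySem.Set.ofList [some "individual", some "government"])).isEmpty
      then "partial_foreign" else "foreign_unresolved"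
    else if PySem.Set.contains resolutions (some "unresolved_statement") || PySem.Set.contains resolutions (some "no_psc_data") then "partial_unresolved"
    else "partial_unresolved"

-- ===== PORT B =====
-- Source B's module constant _CAT (category bits; Python dict keys are strings, looked up with a
-- possibly-None value, so the key type here is Option String and None never matches)
def pvCatDict : PySem.Dict (Option String) Nat :=
  PySem.Dict.mk [(some "individual", 1), (some "government", 2), (some "foreign_unresolved", 4)]

-- Source B's module constant _TABLE
def pvTable : PySem.Dict Nat String :=
  PySem.Dict.mk [(1, "individual"), (2, "government"), (3, "mixed_clear"),
    (4, "foreign_unresolved"), (5, "partial_foreign"), (6, "partial_foreign"), (7, "partial_foreign"),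
    (8, "partial_unresolved"), (9, "partial_unresolved"), (10, "partial_unresolved"), (11, "partial_unresolved"),
    (12, "foreign_unresolved"), (13, "partial_foreign"), (14, "partial_foreign"), (15, "partial_foreign")]

def summarize_resolution_alt (chains : List (List (List (String × String)))) : String :=
  if chains = [] then "no_psc"
  else
    let mask := chains.foldl (fun m c => m ||| PySem.Dict.getD pvCatDict (pvResA c) 8) 0
    -- _TABLE[mask]: a KeyError is impossible here (mask ∈ 1..15 for nonempty chains)
    match PySem.Dict.get? pvTable mask with
    | some s => s
    | none => ""

-- ===== PRECONDITION & SPEC =====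
-- Pre_ excludes inputs containing an empty inner chain, on which Python's c[-1] raises IndexError.
def Pre_summarize_resolution (chains : List (List (List (String × String)))) : Prop :=
  ∀ c ∈ chains, c ≠ []
instance (chains : List (List (List (String × String)))) : Decidable (Pre_summarize_resolution chains) := by unfold Pre_summarize_resolution; infer_instance

def pvWitness_summarize_resolution : (List (List (List (String × String)))) :=
  [[[("resolution", "individual")]], [[("resolution", "government")]]]

def Spec_summarize_resolution (chains : List (List (List (String × String)))) (out : String) : Prop := out = summarize_resolution_alt chains
instance (chains : List (List (List (String × String)))) (out : String) : Decidable (Spec_summarize_resolution chains out) := by unfold Spec_summarize_resolution; infer_instance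

-- ===== CLAIM (what is proved, stated in full; the proofs are below) =====
def Claim_equal_summarize_resolution : Prop := ∀ (chains : List (List (List (String × String)))), Dom_summarize_resolution chains → Pre_summarize_resolution chains → Spec_summarize_resolution chains (summarize_resolution chains)

-- ===== LEMMAS AND PROOFS =====

-- "anything else" (including a missing key, i.e. Python None)
def pvOther (r : Option String) : Bool :=
  !(r == some "individual") && !(r == some "government") && !(r == some "foreign_unresolved")

-- every resolution value falls in one of the four categories
theorem pvClassifyP (r : Option String) :
    r = some "individual" ∨ r = some "government" ∨ r = some "foreign_unresolved" ∨ pvOther r = true := by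
  by_cases h1 : r = some "individual"
  · exact Or.inl h1
  by_cases h2 : r = some "government"
  · exact Or.inr (Or.inl h2)
  by_cases h3 : r = some "foreign_unresolved"
  · exact Or.inr (Or.inr (Or.inl h3))
  exact Or.inr (Or.inr (Or.inr (by simp [pvOther, h1, h2, h3])))

-- the bitmask encoding of four presence facts
def pvMaskOf (i g f o : Bool) : Nat :=
  (cond i 1 0) ||| (cond g 2 0) ||| (cond f 4 0) ||| (cond o 8 0)

-- _CAT.get(r, 8) as a branch on the category of r
theorem pvCat_eq (r : Option String) :
    PySem.Dict.getD pvCatDict r 8 =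
      if r = some "individual" then 1 else if r = some "government" then 2
      else if r = some "foreign_unresolved" then 4 else 8 := by
  by_cases h1 : r = some "individual"
  · subst h1; rfl
  by_cases h2 : r = some "government"
  · subst h2; rfl
  by_cases h3 : r = some "foreign_unresolved"
  · subst h3; rfl
  have e1 : ((some "individual" : Option String) == r) = false := by
    simp; intro he; exact h1 he.symm
  have e2 : ((some "government" : Option String) == r) = false := by
    simp; intro he; exact h2 he.symm
  have e3 : ((some "foreign_unresolved" : Option String) == r) = false := by
    simp; intro he; exact h3 he.symm
  simp [pvCatDict, PySem.Dict.getD, PySem.Dict.get?, h1, h2, h3, List.find?, e1, e2, e3]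

theorem pvMask_or1 (i g f o : Bool) : pvMaskOf i g f o ||| 1 = pvMaskOf true g f o := by
  cases i <;> cases g <;> cases f <;> cases o <;> decide
theorem pvMask_or2 (i g f o : Bool) : pvMaskOf i g f o ||| 2 = pvMaskOf i true f o := by
  cases i <;> cases g <;> cases f <;> cases o <;> decide
theorem pvMask_or4 (i g f o : Bool) : pvMaskOf i g f o ||| 4 = pvMaskOf i g true o := by
  cases i <;> cases g <;> cases f <;> cases o <;> decide
theorem pvMask_or8 (i g f o : Bool) : pvMaskOf i g f o ||| 8 = pvMaskOf i g f true := by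
  cases i <;> cases g <;> cases f <;> cases o <;> decide

-- B's fold computes the bitmask of the four "some chain has this category" facts
theorem pvFoldMask (l : List (List (List (String × String)))) (i g f o : Bool) :
    l.foldl (fun m c => m ||| PySem.Dict.getD pvCatDict (pvResA c) 8) (pvMaskOf i g f o) =
      pvMaskOf (i || l.any (fun ch => pvResA ch == some "individual"))
               (g || l.any (fun ch => pvResA ch == some "government"))
               (f || l.any (fun ch => pvResA ch == some "foreign_unresolved"))
               (o || l.any (fun ch => pvOther (pvResA ch))) := by
  induction l generalizing i g f o with
  | nil => simp
  | cons x t ih =>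
    rw [List.foldl_cons, pvCat_eq]
    rcases pvClassifyP (pvResA x) with h | h | h | h
    · rw [if_pos h, pvMask_or1, ih]
      simp [List.any_cons, h, pvOther]
    · have h1 : pvResA x ≠ some "individual" := by rw [h]; decide
      rw [if_neg h1, if_pos h, pvMask_or2, ih]
      simp [List.any_cons, h, pvOther]
    · have h1 : pvResA x ≠ some "individual" := by rw [h]; decide
      have h2 : pvResA x ≠ some "government" := by rw [h]; decide
      rw [if_neg h1, if_neg h2, if_pos h, pvMask_or4, ih]
      simp [List.any_cons, h, pvOther]
    · have h1 : pvResA x ≠ some "individual" := by simpa [pvOther] using fun he => by simp [pvOther, he] at h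
      have h2 : pvResA x ≠ some "government" := by simpa [pvOther] using fun he => by simp [pvOther, he] at h
      have h3 : pvResA x ≠ some "foreign_unresolved" := by simpa [pvOther] using fun he => by simp [pvOther, he] at h
      rw [if_neg h1, if_neg h2, if_neg h3, pvMask_or8, ih]
      simp only [List.any_cons]
      have e1 : (pvResA x == some "individual") = false := by simp [h1]
      have e2 : (pvResA x == some "government") = false := by simp [h2]
      have e3 : (pvResA x == some "foreign_unresolved") = false := by simp [h3]
      rw [e1, e2, e3, h]
      simp

-- the table lookup of B, as a total function
def pvDecTable (m : Nat) : String :=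
  match PySem.Dict.get? pvTable m with
  | some s => s
  | none => ""

-- A's decision ladder, rephrased on the four presence facts
def pvDecA (i g f o : Bool) : String :=
  if i && !g && !f && !o then "individual"
  else if g && !i && !f && !o then "government"
  else if !f && !o then "mixed_clear"
  else if f then (if i || g then "partial_foreign" else "foreign_unresolved")
  else "partial_unresolved"

theorem pvDec_eq (i g f o : Bool) (h : (i || g || f || o) = true) :
    pvDecA i g f o = pvDecTable (pvMaskOf i g f o) := by
  revert h; cases i <;> cases g <;> cases f <;> cases o <;> decide

theorem pvB_char (chains : List (List (List (String × String)))) (h : chains ≠ []) :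
    summarize_resolution_alt chains =
      pvDecTable (pvMaskOf (chains.any (fun ch => pvResA ch == some "individual"))
                           (chains.any (fun ch => pvResA ch == some "government"))
                           (chains.any (fun ch => pvResA ch == some "foreign_unresolved"))
                           (chains.any (fun ch => pvOther (pvResA ch)))) := by
  unfold summarize_resolution_alt pvDecTable
  rw [if_neg h]
  have h0 : (0 : Nat) = pvMaskOf false false false false := rfl
  rw [h0, pvFoldMask]
  simp

theorem pvAny_beq (chains : List (List (List (String × String)))) (v : Option String) :
    (chains.any (fun ch => pvResA ch == v)) = true ↔ ∃ ch ∈ chains, pvResA ch = v := by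
  simp only [List.any_eq_true, beq_iff_eq]

theorem pvAny_oth (chains : List (List (List (String × String)))) :
    (chains.any (fun ch => pvOther (pvResA ch))) = true ↔ ∃ ch ∈ chains, pvOther (pvResA ch) = true := by
  simp only [List.any_eq_true]

-- membership in A's set, via an any-scan
theorem pvMemAny (chains : List (List (List (String × String)))) (v : Option String) :
    (chains.any (fun ch => pvResA ch == v)) = true ↔ v ∈ PySem.Set.ofList (chains.map pvResA) := by
  rw [PySem.Set.mem_ofList, List.mem_map, pvAny_beq]

theorem pvBoolEq (a b : Bool) (h : a = true ↔ b = true) : a = b := by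
  cases a <;> cases b <;> simp_all

theorem pvAnyFalse (chains : List (List (List (String × String)))) (v : Option String)
    (hv : (chains.any (fun ch => pvResA ch == v)) = false)
    {ch : List (List (String × String))} (hch : ch ∈ chains) : pvResA ch ≠ v := by
  intro he
  have := (pvAny_beq chains v).mpr ⟨ch, hch, he⟩
  rw [hv] at this
  exact Bool.false_ne_true this

theorem pvAnyFalseOf (chains : List (List (List (String × String)))) (v : Option String)
    (h : ∀ ch ∈ chains, pvResA ch ≠ v) : (chains.any (fun ch => pvResA ch == v)) = false := by
  cases hx : chains.any (fun ch => pvResA ch == v) with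
  | false => rfl
  | true =>
    obtain ⟨ch, hch, he⟩ := (pvAny_beq chains v).mp hx
    exact absurd he (h ch hch)

theorem pvOthFalse (chains : List (List (List (String × String))))
    (ho : (chains.any (fun ch => pvOther (pvResA ch))) = false)
    {ch : List (List (String × String))} (hch : ch ∈ chains) : pvOther (pvResA ch) = false := by
  cases hh : pvOther (pvResA ch) with
  | false => rfl
  | true =>
    have := (pvAny_oth chains).mpr ⟨ch, hch, hh⟩
    rw [ho] at this
    exact absurd this Bool.false_ne_true

theorem pvOthFalseOf (chains : List (List (List (String × String))))
    (h : ∀ ch ∈ chains, pvOther (pvResA ch) = false) :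
    (chains.any (fun ch => pvOther (pvResA ch))) = false := by
  cases hx : chains.any (fun ch => pvOther (pvResA ch)) with
  | false => rfl
  | true =>
    obtain ⟨ch, hch, he⟩ := (pvAny_oth chains).mp hx
    rw [h ch hch] at he
    exact absurd he Bool.false_ne_true

-- with no foreign and no other chain, every chain resolves to individual or government
theorem pvForce (chains : List (List (List (String × String))))
    (hf : (chains.any (fun ch => pvResA ch == some "foreign_unresolved")) = false)
    (ho : (chains.any (fun ch => pvOther (pvResA ch))) = false)
    {ch : List (List (String × String))} (hch : ch ∈ chains) :
    pvResA ch = some "individual" ∨ pvResA ch = some "government" := by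
  rcases pvClassifyP (pvResA ch) with h | h | h | h
  · exact Or.inl h
  · exact Or.inr h
  · exact absurd h (pvAnyFalse chains _ hf hch)
  · rw [pvOthFalse chains ho hch] at h
    exact absurd h Bool.false_ne_true

-- the five set-algebra conditions of A, as equations on the four presence facts
theorem pvCond1 (chains : List (List (List (String × String)))) :
    PySem.Set.equal (PySem.Set.ofList (chains.map pvResA)) (PySem.Set.ofList [some "individual"]) =
      ((chains.any (fun ch => pvResA ch == some "individual")) &&
       !(chains.any (fun ch => pvResA ch == some "government")) &&
       !(chains.any (fun ch => pvResA ch == some "foreign_unresolved")) &&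
       !(chains.any (fun ch => pvOther (pvResA ch)))) := by
  apply pvBoolEq
  rw [PySem.Set.equal_iff]
  simp only [Bool.and_eq_true, Bool.not_eq_true']
  constructor
  · intro hall
    have hone : ∀ ch ∈ chains, pvResA ch = some "individual" := by
      intro ch hch
      have hx := (hall (pvResA ch)).mp ((PySem.Set.mem_ofList _ _).mpr (List.mem_map_of_mem hch))
      rw [PySem.Set.mem_ofList] at hx
      simpa using hx
    refine ⟨⟨⟨?_, ?_⟩, ?_⟩, ?_⟩
    · exact (pvMemAny chains _).mpr ((hall _).mpr ((PySem.Set.mem_ofList _ _).mpr (by simp)))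
    · exact pvAnyFalseOf chains _ (fun ch hch => by rw [hone ch hch]; simp)
    · exact pvAnyFalseOf chains _ (fun ch hch => by rw [hone ch hch]; simp)
    · exact pvOthFalseOf chains (fun ch hch => by rw [hone ch hch]; rfl)
  · rintro ⟨⟨⟨hi, hg⟩, hf⟩, ho⟩ x
    rw [PySem.Set.mem_ofList, PySem.Set.mem_ofList]
    simp only [List.mem_singleton]
    constructor
    · intro hx
      obtain ⟨ch, hch, rfl⟩ := List.mem_map.mp hx
      rcases pvForce chains hf ho hch with h | h
      · exact h
      · exact absurd h (pvAnyFalse chains _ hg hch)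
    · rintro rfl
      obtain ⟨ch, hch, he⟩ := (pvAny_beq chains _).mp hi
      exact List.mem_map.mpr ⟨ch, hch, he⟩

theorem pvCond2 (chains : List (List (List (String × String)))) :
    PySem.Set.equal (PySem.Set.ofList (chains.map pvResA)) (PySem.Set.ofList [some "government"]) =
      ((chains.any (fun ch => pvResA ch == some "government")) &&
       !(chains.any (fun ch => pvResA ch == some "individual")) &&
       !(chains.any (fun ch => pvResA ch == some "foreign_unresolved")) &&
       !(chains.any (fun ch => pvOther (pvResA ch)))) := by
  apply pvBoolEq
  rw [PySem.Set.equal_iff]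
  simp only [Bool.and_eq_true, Bool.not_eq_true']
  constructor
  · intro hall
    have hone : ∀ ch ∈ chains, pvResA ch = some "government" := by
      intro ch hch
      have hx := (hall (pvResA ch)).mp ((PySem.Set.mem_ofList _ _).mpr (List.mem_map_of_mem hch))
      rw [PySem.Set.mem_ofList] at hx
      simpa using hx
    refine ⟨⟨⟨?_, ?_⟩, ?_⟩, ?_⟩
    · exact (pvMemAny chains _).mpr ((hall _).mpr ((PySem.Set.mem_ofList _ _).mpr (by simp)))
    · exact pvAnyFalseOf chains _ (fun ch hch => by rw [hone ch hch]; simp)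
    · exact pvAnyFalseOf chains _ (fun ch hch => by rw [hone ch hch]; simp)
    · exact pvOthFalseOf chains (fun ch hch => by rw [hone ch hch]; rfl)
  · rintro ⟨⟨⟨hgv, hi⟩, hf⟩, ho⟩ x
    rw [PySem.Set.mem_ofList, PySem.Set.mem_ofList]
    simp only [List.mem_singleton]
    constructor
    · intro hx
      obtain ⟨ch, hch, rfl⟩ := List.mem_map.mp hx
      rcases pvForce chains hf ho hch with h | h
      · exact absurd h (pvAnyFalse chains _ hi hch)
      · exact h
    · rintro rfl
      obtain ⟨ch, hch, he⟩ := (pvAny_beq chains _).mp hgv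
      exact List.mem_map.mpr ⟨ch, hch, he⟩

theorem pvCond3 (chains : List (List (List (String × String)))) :
    PySem.Set.issubset (PySem.Set.ofList (chains.map pvResA)) (PySem.Set.ofList [some "individual", some "government"]) =
      (!(chains.any (fun ch => pvResA ch == some "foreign_unresolved")) &&
       !(chains.any (fun ch => pvOther (pvResA ch)))) := by
  apply pvBoolEq
  rw [PySem.Set.issubset_iff]
  simp only [Bool.and_eq_true, Bool.not_eq_true']
  constructor
  · intro hsub
    constructor
    · refine pvAnyFalseOf chains _ (fun ch hch he => ?_)
      have := hsub _ ((PySem.Set.mem_ofList _ _).mpr (List.mem_map_of_mem hch))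
      rw [PySem.Set.mem_ofList, he] at this
      simp at this
    · refine pvOthFalseOf chains (fun ch hch => ?_)
      have := hsub _ ((PySem.Set.mem_ofList _ _).mpr (List.mem_map_of_mem hch))
      rw [PySem.Set.mem_ofList] at this
      simp only [List.mem_cons, List.not_mem_nil, or_false] at this
      rcases this with h | h <;> rw [h] <;> rfl
  · rintro ⟨hf, ho⟩ x hx
    rw [PySem.Set.mem_ofList] at hx ⊢
    obtain ⟨ch, hch, rfl⟩ := List.mem_map.mp hx
    rcases pvForce chains hf ho hch with h | h <;> simp [h]

theorem pvCond4 (chains : List (List (List (String × String)))) :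
    PySem.Set.contains (PySem.Set.ofList (chains.map pvResA)) (some "foreign_unresolved") =
      (chains.any (fun ch => pvResA ch == some "foreign_unresolved")) := by
  apply pvBoolEq
  rw [PySem.Set.contains_iff, ← pvMemAny]

theorem pvCond5 (chains : List (List (List (String × String)))) :
    (!(PySem.Set.inter (PySem.Set.ofList (chains.map pvResA)) (PySem.Set.ofList [some "individual", some "government"])).isEmpty) =
      ((chains.any (fun ch => pvResA ch == some "individual")) ||
       (chains.any (fun ch => pvResA ch == some "government"))) := by
  apply pvBoolEq
  constructor
  · intro hne
    cases hI : PySem.Set.inter (PySem.Set.ofList (chains.map pvResA)) (PySem.Set.ofList [some "individual", some "government"]) with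
    | nil => rw [hI] at hne; simp at hne
    | cons y ys =>
      have hy : y ∈ PySem.Set.inter (PySem.Set.ofList (chains.map pvResA)) (PySem.Set.ofList [some "individual", some "government"]) := by
        rw [hI]; exact List.mem_cons_self
      rw [PySem.Set.mem_inter] at hy
      obtain ⟨hyS, hyT⟩ := hy
      simp only [PySem.Set.mem_ofList, List.mem_cons, List.not_mem_nil, or_false] at hyT
      rcases hyT with rfl | rfl
      · have hi := (pvMemAny chains _).mpr hyS
        simp [hi]
      · have hg := (pvMemAny chains _).mpr hyS
        simp [hg]
  · intro hig
    have hmem : ∃ v, v ∈ PySem.Set.inter (PySem.Set.ofList (chains.map pvResA)) (PySem.Set.ofList [some "individual", some "government"]) := by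
      cases hi : chains.any (fun ch => pvResA ch == some "individual") with
      | true => exact ⟨some "individual", (PySem.Set.mem_inter _ _ _).mpr ⟨(pvMemAny chains _).mp hi, by simp⟩⟩
      | false =>
        have hg : (chains.any (fun ch => pvResA ch == some "government")) = true := by
          rw [hi] at hig; simpa using hig
        exact ⟨some "government", (PySem.Set.mem_inter _ _ _).mpr ⟨(pvMemAny chains _).mp hg, by simp⟩⟩
    obtain ⟨v, hv⟩ := hmem
    cases hI : PySem.Set.inter (PySem.Set.ofList (chains.map pvResA)) (PySem.Set.ofList [some "individual", some "government"]) with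
    | nil => rw [hI] at hv; simp at hv
    | cons y ys => rfl

theorem pvA_char (chains : List (List (List (String × String)))) (h : chains ≠ []) :
    summarize_resolution chains =
      pvDecA (chains.any (fun ch => pvResA ch == some "individual"))
             (chains.any (fun ch => pvResA ch == some "government"))
             (chains.any (fun ch => pvResA ch == some "foreign_unresolved"))
             (chains.any (fun ch => pvOther (pvResA ch))) := by
  unfold summarize_resolution pvDecA
  rw [if_neg h]
  simp only [pvCond1, pvCond2, pvCond3, pvCond4, pvCond5, ite_self]

theorem pvNonempty_flags (chains : List (List (List (String × String)))) (h : chains ≠ []) :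
    ((chains.any (fun ch => pvResA ch == some "individual")) ||
     (chains.any (fun ch => pvResA ch == some "government")) ||
     (chains.any (fun ch => pvResA ch == some "foreign_unresolved")) ||
     (chains.any (fun ch => pvOther (pvResA ch)))) = true := by
  obtain ⟨x, t, rfl⟩ := List.exists_cons_of_ne_nil h
  rcases pvClassifyP (pvResA x) with h1 | h1 | h1 | h1 <;>
    simp [List.any_cons, h1]

-- ===== VERDICT (by name: the statement is the Claim_ definition above) =====
theorem summarize_resolution_spec : Claim_equal_summarize_resolution := by
  intro chains _ _
  unfold Spec_summarize_resolution
  by_cases h : chains = []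
  · subst h; rfl
  · rw [pvA_char chains h, pvDec_eq _ _ _ _ (pvNonempty_flags chains h), ← pvB_char chains h]
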